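-- pv_equiv track=rewrite | github.com/SakshamPandla/AtithiVerse | Website/app.py | get_contextual_suggestions
-- ===== SOURCE A (Python) =====
-- def get_contextual_suggestions(user_input, docs):
--     """Generate smart suggestions based on input and context"""
--     input_lower = user_input.lower()
--
--     # Context-based suggestions
--     if docs and any('taj mahal' in doc.lower() for doc in docs):
--         return ["2-day Agra itinerary", "Best Taj Mahal timings", "Agra Fort combo", "Photography tips"]
--     elif docs and any('goa' in doc.lower() for doc in docs):
--         return ["North vs South Goa", "Beach activities", "Nightlife spots", "Monsoon travel"]
--     elif docs and any('kerala' in doc.lower() for doc in docs):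
--         return ["Houseboat booking", "Hill stations", "Ayurveda spas", "Cuisine guide"]
--
--     # Input-based suggestions
--     if 'popular' in input_lower:
--         return ["Golden Triangle tour", "Beach destinations", "Mountain retreats", "Cultural circuits"]
--     elif any(word in input_lower for word in ['plan', 'trip']):
--         return ["7-day itineraries", "Budget planning", "Best seasons", "Transportation"]
--     elif any(word in input_lower for word in ['budget', 'cost']):
--         return ["Money-saving tips", "Budget destinations", "Free attractions", "Local transport"]
--     else:
--         return ["Popular destinations", "Trip planning", "Best travel time", "Cultural experiences"]
-- ===== SOURCE B (Python) =====
-- DEFAULT = ["Popular destinations", "Trip planning", "Best travel time", "Cultural experiences"]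
--
--
-- def get_contextual_suggestions(user_input, docs):
--     """Generate smart suggestions based on input and context"""
--     input_lower = user_input.lower()
--     lowered_docs = [d.lower() for d in docs]
--     trip_plan = ["7-day itineraries", "Budget planning", "Best seasons", "Transportation"]
--     budget = ["Money-saving tips", "Budget destinations", "Free attractions", "Local transport"]
--     # one flat rule list (keyword, texts to search, answer), lowest priority first;
--     # a backward sweep keeps the LAST match = the highest-priority rule
--     rules = [
--         ('cost', [input_lower], budget),
--         ('budget', [input_lower], budget),
--         ('trip', [input_lower], trip_plan),
--         ('plan', [input_lower], trip_plan),
--         ('popular', [input_lower], ["Golden Triangle tour", "Beach destinations", "Mountain retreats", "Cultural circuits"]),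
--         ('kerala', lowered_docs, ["Houseboat booking", "Hill stations", "Ayurveda spas", "Cuisine guide"]),
--         ('goa', lowered_docs, ["North vs South Goa", "Beach activities", "Nightlife spots", "Monsoon travel"]),
--         ('taj mahal', lowered_docs, ["2-day Agra itinerary", "Best Taj Mahal timings", "Agra Fort combo", "Photography tips"]),
--     ]
--     result = DEFAULT
--     for keyword, texts, answer in rules:
--         if any(keyword in t for t in texts):
--             result = answer
--     return result
-- ===== Notes on version B (the rewrite author's own statement) =====
-- stated objective: alternative
-- what changed: Replaces the early-return if/elif chain by a single flat (keyword, texts, answer) rule list in reverse priority order swept once by an accumulator loop with no early exit: the last matching rule (= highest priority) wins; the or-groups are flattened into separate single-keyword rules and the docs-truthiness guard disappears (any() over no docs is already false).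
import Mathlib
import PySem

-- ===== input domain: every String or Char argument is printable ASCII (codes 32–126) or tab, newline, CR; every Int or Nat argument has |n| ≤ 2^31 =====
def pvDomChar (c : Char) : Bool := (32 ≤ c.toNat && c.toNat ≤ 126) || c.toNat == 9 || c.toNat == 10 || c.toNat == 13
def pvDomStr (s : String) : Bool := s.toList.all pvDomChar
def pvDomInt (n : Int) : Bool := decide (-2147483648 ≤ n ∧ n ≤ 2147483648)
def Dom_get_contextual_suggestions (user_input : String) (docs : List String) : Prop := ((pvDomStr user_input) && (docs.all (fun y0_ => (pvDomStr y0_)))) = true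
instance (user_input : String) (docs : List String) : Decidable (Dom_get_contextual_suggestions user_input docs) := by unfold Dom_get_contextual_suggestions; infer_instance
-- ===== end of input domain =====

-- ===== PORT A =====
def get_contextual_suggestions (user_input : String) (docs : List String) : List String :=
  let input_lower := PySem.Str.lower user_input
  if !docs.isEmpty && docs.any (fun doc => PySem.Str.isIn "taj mahal" (PySem.Str.lower doc)) then
    ["2-day Agra itinerary", "Best Taj Mahal timings", "Agra Fort combo", "Photography tips"]
  else if !docs.isEmpty && docs.any (fun doc => PySem.Str.isIn "goa" (PySem.Str.lower doc)) then
    ["North vs South Goa", "Beach activities", "Nightlife spots", "Monsoon travel"]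
  else if !docs.isEmpty && docs.any (fun doc => PySem.Str.isIn "kerala" (PySem.Str.lower doc)) then
    ["Houseboat booking", "Hill stations", "Ayurveda spas", "Cuisine guide"]
  else if PySem.Str.isIn "popular" input_lower then
    ["Golden Triangle tour", "Beach destinations", "Mountain retreats", "Cultural circuits"]
  else if ["plan", "trip"].any (fun word => PySem.Str.isIn word input_lower) then
    ["7-day itineraries", "Budget planning", "Best seasons", "Transportation"]
  else if ["budget", "cost"].any (fun word => PySem.Str.isIn word input_lower) then
    ["Money-saving tips", "Budget destinations", "Free attractions", "Local transport"]
  else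
    ["Popular destinations", "Trip planning", "Best travel time", "Cultural experiences"]

-- ===== PORT B =====
-- B (alternative): one flat (keyword, texts, answer) rule list in reverse priority order swept
-- by an accumulator fold — the last match (= highest-priority rule) wins; no early return.
def pvDefaultSuggestions : List String :=
  ["Popular destinations", "Trip planning", "Best travel time", "Cultural experiences"]

def get_contextual_suggestions_alt (user_input : String) (docs : List String) : List String :=
  let input_lower := PySem.Str.lower user_input
  let lowered_docs := docs.map PySem.Str.lower
  let trip_plan := ["7-day itineraries", "Budget planning", "Best seasons", "Transportation"]
  let budget := ["Money-saving tips", "Budget destinations", "Free attractions", "Local transport"]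
  let rules : List (String × List String × List String) :=
    [("cost", [input_lower], budget),
     ("budget", [input_lower], budget),
     ("trip", [input_lower], trip_plan),
     ("plan", [input_lower], trip_plan),
     ("popular", [input_lower], ["Golden Triangle tour", "Beach destinations", "Mountain retreats", "Cultural circuits"]),
     ("kerala", lowered_docs, ["Houseboat booking", "Hill stations", "Ayurveda spas", "Cuisine guide"]),
     ("goa", lowered_docs, ["North vs South Goa", "Beach activities", "Nightlife spots", "Monsoon travel"]),
     ("taj mahal", lowered_docs, ["2-day Agra itinerary", "Best Taj Mahal timings", "Agra Fort combo", "Photography tips"])]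
  rules.foldl
    (fun result rule =>
      if rule.2.1.any (fun t => PySem.Str.isIn rule.1 t) then rule.2.2 else result)
    pvDefaultSuggestions

-- ===== PRECONDITION & SPEC =====
def Spec_get_contextual_suggestions (user_input : String) (docs : List String) (out : List String) : Prop := out = get_contextual_suggestions_alt user_input docs
instance (user_input : String) (docs : List String) (out : List String) : Decidable (Spec_get_contextual_suggestions user_input docs out) := by unfold Spec_get_contextual_suggestions; infer_instance

-- ===== CLAIM (what is proved, stated in full; the proofs are below) =====
def Claim_equal_get_contextual_suggestions : Prop := ∀ (user_input : String) (docs : List String), Dom_get_contextual_suggestions user_input docs → Spec_get_contextual_suggestions user_input docs (get_contextual_suggestions user_input docs)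

-- ===== LEMMAS AND PROOFS =====
-- A's `docs and any(...)` guard equals the bare `any` (any over [] is already false).
lemma pv_any_nonempty (docs : List String) (f : String → Bool) :
    (!docs.isEmpty && docs.any f) = docs.any f := by
  cases docs <;> simp

-- An if/elif chain with grouped `or` conditions equals the fully flattened chain.
lemma pv_chain (t g k p pl tr b c : Bool) (L1 L2 L3 L4 L5 L6 D : List String) :
    (if t = true then L1 else if g = true then L2 else if k = true then L3
     else if p = true then L4 else if (pl || tr) = true then L5
     else if (b || c) = true then L6 else D)
    = (if t = true then L1 else
       if g = true then L2 else
       if k = true then L3 else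
       if p = true then L4 else
       if pl = true then L5 else
       if tr = true then L5 else
       if b = true then L6 else
       if c = true then L6 else D) := by
  cases pl <;> cases tr <;> cases b <;> cases c <;> simp

-- ===== VERDICT (by name: the statement is the Claim_ definition above) =====
theorem get_contextual_suggestions_spec : Claim_equal_get_contextual_suggestions := by
  intro user_input docs _
  unfold Spec_get_contextual_suggestions get_contextual_suggestions get_contextual_suggestions_alt
  simp only [pvDefaultSuggestions, pv_any_nonempty, List.any_map, List.any_cons,
    List.any_nil, Bool.or_false, List.foldl_cons, List.foldl_nil, Function.comp_def]
  exact pv_chain _ _ _ _ _ _ _ _ _ _ _ _ _ _ _
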